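-- pv_equiv track=rewrite | github.com/FernandoMarreoHernandez/Sistemas_Recomendacion_contenido | src/main.py | pos_words
-- ===== SOURCE A (Python) =====
-- def indices_count(palabra, documents):
--     indices = []
--     for i in range(len(documents)):
--         if documents[i] == palabra:
--             indices.append(i)
--     return indices
--
-- def pos_words(words_doc):
--     matrix = {}
--     for i, doc in enumerate(words_doc):
--         docinfo = {}
--         for word in doc:
--             docinfo[word] = [indices_count(word, doc)]
--         matrix[i] = docinfo
--     return matrix
-- ===== SOURCE B (Python) =====
-- def pos_words(words_doc):
--     matrix = {}
--     for i, doc in enumerate(words_doc):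
--         positions = {}
--         for j, word in enumerate(doc):
--             positions.setdefault(word, []).append(j)
--         matrix[i] = {w: [ix] for w, ix in positions.items()}
--     return matrix
-- ===== Notes on version B (the rewrite author's own statement) =====
-- stated objective: faster
-- what changed: Replaces the per-word full rescan of the document (indices_count inside the inner loop) by a single enumerate pass per document that accumulates each word's occurrence indices into a dict, then wraps each index list in a singleton list.
import Mathlib
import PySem

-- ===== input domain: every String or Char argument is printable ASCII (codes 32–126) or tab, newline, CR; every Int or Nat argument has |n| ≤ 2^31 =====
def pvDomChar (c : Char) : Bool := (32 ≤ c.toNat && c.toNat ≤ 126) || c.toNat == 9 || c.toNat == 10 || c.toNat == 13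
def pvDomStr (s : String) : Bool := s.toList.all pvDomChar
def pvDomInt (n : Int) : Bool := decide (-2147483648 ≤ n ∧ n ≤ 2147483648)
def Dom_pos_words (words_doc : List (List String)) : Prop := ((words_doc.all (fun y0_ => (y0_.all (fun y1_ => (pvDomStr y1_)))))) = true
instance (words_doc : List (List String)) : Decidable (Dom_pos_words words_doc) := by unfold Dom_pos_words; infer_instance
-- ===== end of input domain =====

-- B replaces A's per-word full rescan of each document (indices_count in the inner loop)
-- by one enumerate pass per document that accumulates occurrence indices into a dict (objective: faster).

-- ===== PORT A =====
-- indices_count(palabra, documents): scan all positions, collect matching indices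
def indices_count (palabra : String) (documents : List String) : List Int :=
  (PySem.List.pyRange 0 (documents.length : Int) 1).foldl
    (fun indices i =>
      -- documents[i]: i comes from range(len(documents)), always in range, so pyGetD is exact here
      if PySem.List.pyGetD documents i "" = palabra then indices ++ [i] else indices)
    []

def pos_words (words_doc : List (List String)) : List (Int × List (String × List (List Int))) :=
  ((PySem.List.enumerate words_doc 0).foldl
    (fun (matrix : PySem.Dict Int (PySem.Dict String (List (List Int)))) p =>
      matrix.insert p.1
        (p.2.foldl (fun (docinfo : PySem.Dict String (List (List Int))) word =>
          docinfo.insert word [indices_count word p.2]) PySem.Dict.empty))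
    PySem.Dict.empty).items.map (fun q => (q.1, q.2.items))

-- ===== PORT B =====
-- positions = {}; for j, word in enumerate(doc): positions.setdefault(word, []).append(j)
def doc_positions (doc : List String) : PySem.Dict String (List Int) :=
  (PySem.List.enumerate doc 0).foldl
    (fun d p => d.modify p.2 [] (· ++ [p.1])) PySem.Dict.empty

def pos_words_alt (words_doc : List (List String)) : List (Int × List (String × List (List Int))) :=
  ((PySem.List.enumerate words_doc 0).foldl
    (fun (matrix : PySem.Dict Int (List (String × List (List Int)))) p =>
      matrix.insert p.1 ((doc_positions p.2).items.map (fun q => (q.1, [q.2]))))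
    PySem.Dict.empty).items

-- ===== PRECONDITION & SPEC =====
def Spec_pos_words (words_doc : List (List String)) (out : List (Int × List (String × List (List Int)))) : Prop := out = pos_words_alt words_doc
instance (words_doc : List (List String)) (out : List (Int × List (String × List (List Int)))) : Decidable (Spec_pos_words words_doc out) := by unfold Spec_pos_words; infer_instance

-- ===== CLAIM (what is proved, stated in full; the proofs are below) =====
def Claim_equal_pos_words : Prop := ∀ (words_doc : List (List String)), Dom_pos_words words_doc → Spec_pos_words words_doc (pos_words words_doc)

-- ===== LEMMAS AND PROOFS =====

-- occurrence indices of w in doc, positions counted from s: the common normal form of both ports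
def occAux (w : String) : List String → Int → List Int
  | [], _ => []
  | x :: xs, s => if x = w then s :: occAux w xs (s + 1) else occAux w xs (s + 1)

lemma enum_filter_eq_occAux (w : String) :
    ∀ (doc : List String) (s : Int),
      ((PySem.List.enumerate doc s).filter (fun p => p.2 == w)).map (·.1) = occAux w doc s := by
  intro doc
  induction doc with
  | nil => intro s; simp [PySem.List.enumerate_nil, occAux]
  | cons x xs ih =>
    intro s
    simp only [PySem.List.enumerate_cons, List.filter_cons, occAux]
    by_cases h : x = w <;> simp [h, ih]

lemma range_filter_eq_occAux (w : String) :
    ∀ (doc : List String) (s : Int),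
      ((List.range doc.length).filter (fun k => decide (doc.getD k "" = w))).map (fun (k : Nat) => s + (k : Int))
        = occAux w doc s := by
  intro doc
  induction doc with
  | nil => intro s; simp [occAux]
  | cons x xs ih =>
    intro s
    rw [List.length_cons, List.range_succ_eq_map, List.filter_cons]
    by_cases h : x = w
    · rw [if_pos (by simp [h])]
      simp only [List.map_cons, List.filter_map, Function.comp_def, List.getD_cons_succ,
        List.map_map, occAux, if_pos h]
      congr 1
      · omega
      · rw [← ih (s + 1)]; apply List.map_congr_left; intro k _; push_cast; ring
    · rw [if_neg (by simp [h])]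
      simp only [List.filter_map, Function.comp_def, List.getD_cons_succ, List.map_map,
        occAux, if_neg h]
      rw [← ih (s + 1)]; apply List.map_congr_left; intro k _; push_cast; ring

lemma indices_count_eq_occAux (w : String) (doc : List String) :
    indices_count w doc = occAux w doc 0 := by
  unfold indices_count
  rw [PySem.List.foldl_append_ite_eq_filter (fun i => PySem.List.pyGetD doc i "" = w)]
  rw [PySem.List.pyRange_zero_nat, List.filter_map, ← range_filter_eq_occAux w doc 0]
  simp only [Function.comp_def, PySem.List.pyGetD_natCast, List.nil_append]
  apply List.map_congr_left; intro k _; omega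

-- the setdefault/append loop of B: each key's accumulated list is the filtered first components
lemma modify_fold_getD :
    ∀ (l : List (Int × String)) (d : PySem.Dict String (List Int)) (c : String),
      (l.foldl (fun d p => d.modify p.2 [] (· ++ [p.1])) d).getD c []
        = d.getD c [] ++ ((l.filter (fun p => p.2 == c)).map (·.1)) := by
  intro l
  induction l with
  | nil => simp
  | cons q l ih =>
    intro d c
    simp only [List.foldl_cons, List.filter_cons, ih, PySem.Dict.getD_modify]
    by_cases h : c = q.2
    · simp [h]
    · rw [if_neg h, if_neg (by simp [beq_iff_eq]; exact fun h' => absurd h'.symm h)]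

lemma getD_doc_positions (w : String) (doc : List String) :
    (doc_positions doc).getD w [] = occAux w doc 0 := by
  unfold doc_positions
  rw [modify_fold_getD, ← enum_filter_eq_occAux w doc 0]
  simp [PySem.Dict.getD_empty]

-- per-document equality of the two inner builds, as items lists
lemma inner_items_eq (doc : List String) :
    (doc.foldl (fun (d : PySem.Dict String (List (List Int))) w =>
        d.insert w [indices_count w doc]) PySem.Dict.empty).items
      = (doc_positions doc).items.map (fun q => (q.1, [q.2])) := by
  have hconst : ∀ (l : List String) (d : PySem.Dict String (List (List Int))) (c : String),
      (l.foldl (fun d x => d.insert x [indices_count x doc]) d).getD c []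
        = if c ∈ l then [indices_count c doc] else d.getD c [] := by
    intro l
    induction l with
    | nil => simp
    | cons x l ih =>
      intro d c
      simp only [List.foldl_cons, ih, PySem.Dict.getD_insert]
      by_cases hm : c ∈ l <;> by_cases he : c = x <;> simp [hm, he]
  have hndA : (doc.foldl (fun (d : PySem.Dict String (List (List Int))) w =>
      d.insert w [indices_count w doc]) PySem.Dict.empty).keys.Nodup :=
    PySem.Dict.nodup_keys_foldl_insert doc (fun _ w => [indices_count w doc])
      PySem.Dict.empty (by simp)
  have hkA : (doc.foldl (fun (d : PySem.Dict String (List (List Int))) w =>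
      d.insert w [indices_count w doc]) PySem.Dict.empty).keys = PySem.Set.ofList doc := by
    simpa [PySem.Dict.keys_empty, PySem.Set.update_nil_left] using
      PySem.Dict.keys_foldl_insert doc (fun _ w => [indices_count w doc]) PySem.Dict.empty
  have hndB : (doc_positions doc).keys.Nodup := by
    unfold doc_positions
    exact PySem.Dict.nodup_keys_foldl_modify_key _ _ _ _ _
      (by simp)
  have hkB : (doc_positions doc).keys = PySem.Set.ofList doc := by
    unfold doc_positions
    simpa [PySem.List.map_snd_enumerate, PySem.Dict.keys_empty, PySem.Set.update_nil_left] using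
      PySem.Dict.keys_foldl_modify_key (PySem.List.enumerate doc 0) (fun p => p.2) []
        (fun _ p v => v ++ [p.1]) PySem.Dict.empty
  rw [PySem.Dict.items_eq_map_keys _ hndA [], PySem.Dict.items_eq_map_keys _ hndB []]
  rw [hkA, hkB, List.map_map]
  apply List.map_congr_left
  intro w hw
  have hw' : w ∈ doc := (PySem.Set.mem_ofList doc w).mp hw
  simp only [Function.comp_def]
  rw [hconst doc PySem.Dict.empty w, if_pos hw', getD_doc_positions, indices_count_eq_occAux]

-- ===== VERDICT (by name: the statement is the Claim_ definition above) =====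
theorem pos_words_spec : Claim_equal_pos_words := by
  intro words_doc _
  unfold Spec_pos_words pos_words pos_words_alt
  rw [PySem.Dict.items_foldl_insert_fresh (PySem.List.enumerate words_doc 0) (fun p => p.1)
      (fun p => (p.2.foldl (fun (docinfo : PySem.Dict String (List (List Int))) word =>
        docinfo.insert word [indices_count word p.2]) PySem.Dict.empty))
      PySem.Dict.empty (by simp [PySem.Dict.contains_empty])
      (by rw [PySem.List.map_fst_enumerate]; exact PySem.List.nodup_pyRange_one _ _),
    PySem.Dict.items_foldl_insert_fresh (PySem.List.enumerate words_doc 0) (fun p => p.1)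
      (fun p => ((doc_positions p.2).items.map (fun q => (q.1, [q.2]))))
      PySem.Dict.empty (by simp [PySem.Dict.contains_empty])
      (by rw [PySem.List.map_fst_enumerate]; exact PySem.List.nodup_pyRange_one _ _)]
  have hempA : (PySem.Dict.empty : PySem.Dict Int (PySem.Dict String (List (List Int)))).items = [] := rfl
  have hempB : (PySem.Dict.empty : PySem.Dict Int (List (String × List (List Int)))).items = [] := rfl
  rw [hempA, hempB]
  simp only [List.nil_append, List.map_map]
  apply List.map_congr_left
  intro p _
  simp only [Function.comp_def]
  rw [inner_items_eq]
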